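-- pv_equiv track=rewrite | github.com/GTJasonMK/LearningSelfAgent | backend/src/agent/runner/think_retrieval_merge_runner.py | _vote_rank
-- ===== SOURCE A (Python) =====
-- from typing import Any, AsyncGenerator, Callable, Dict, List
--
-- def _vote_rank(values_by_planner: List[List]) -> List:
--     """
--     简单投票排序：
--     - 计数：出现于多少个 Planner 的结果中
--     - 排序：count desc，其次按首次出现位置稳定排序
--     """
--     counts: Dict = {}
--     first_seen: Dict = {}
--     for list_index, items in enumerate(values_by_planner or []):
--         seen_local = set()
--         for item_index, raw in enumerate(items or []):
--             if raw is None or raw in seen_local: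
--                 continue
--             seen_local.add(raw)
--             counts[raw] = int(counts.get(raw, 0)) + 1
--             if raw not in first_seen:
--                 first_seen[raw] = (list_index, item_index)
--     ranked = sorted(
--         counts.keys(),
--         key=lambda key: (-int(counts.get(key, 0)), first_seen.get(key, (999, 999))),
--     )
--     return ranked
-- ===== SOURCE B (Python) =====
-- from typing import Dict, List
--
-- def _vote_rank(values_by_planner: List[List]) -> List:
--     # Same counting pass (dedup per planner), then a bucket sort by count:
--     # dict insertion order already is first-seen order, so emitting buckets
--     # from the highest count down yields the ranking without a comparison sort.
--     counts: Dict = {}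
--     for items in (values_by_planner or []):
--         seen_local = set()
--         for raw in (items or []):
--             if raw is None or raw in seen_local:
--                 continue
--             seen_local.add(raw)
--             counts[raw] = counts.get(raw, 0) + 1
--     buckets: Dict = {}
--     for key, cnt in counts.items():
--         buckets.setdefault(cnt, []).append(key)
--     ranked = []
--     for c in range(max(buckets, default=0), 0, -1):
--         ranked.extend(buckets.get(c, []))
--     return ranked
-- ===== Notes on version B (the rewrite author's own statement) =====
-- stated objective: faster
-- what changed: The comparison sort with a composite (-count, first_seen) key and the explicit first_seen table are replaced by a bucket sort: keys are appended to per-count buckets in dict insertion order (= first-seen order) and emitted from the highest count down, so no first_seen positions and no sorted() call are needed.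
import Mathlib
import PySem

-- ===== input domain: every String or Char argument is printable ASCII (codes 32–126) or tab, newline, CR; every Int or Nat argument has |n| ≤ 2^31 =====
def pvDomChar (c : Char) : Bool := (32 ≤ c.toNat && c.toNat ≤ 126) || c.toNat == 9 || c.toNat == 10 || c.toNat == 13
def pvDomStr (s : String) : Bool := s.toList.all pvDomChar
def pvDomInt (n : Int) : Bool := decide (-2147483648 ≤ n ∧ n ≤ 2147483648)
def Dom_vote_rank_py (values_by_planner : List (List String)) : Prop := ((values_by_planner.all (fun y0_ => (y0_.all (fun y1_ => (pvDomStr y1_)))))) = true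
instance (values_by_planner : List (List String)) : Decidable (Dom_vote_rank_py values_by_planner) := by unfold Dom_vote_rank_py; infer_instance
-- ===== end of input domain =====

-- B replaces A's comparison sort on a composite (-count, first_seen) key by a bucket
-- sort over per-count buckets in dict insertion order (alternative decomposition).

-- ===== PORT A =====
-- inner-loop body of A: state (counts, first_seen, seen_local), element (item_index, raw);
-- 'raw is None' can never fire on List String and is dropped.
def pvStepA (list_index : Int)
    (st : PySem.Dict String Int × PySem.Dict String (Int × Int) × PySem.Set String)
    (ir : Int × String) :
    PySem.Dict String Int × PySem.Dict String (Int × Int) × PySem.Set String :=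
  if st.2.2.contains ir.2 then st
  else
    (st.1.insert ir.2 (st.1.getD ir.2 0 + 1),
     (if st.2.1.contains ir.2 then st.2.1 else st.2.1.insert ir.2 (list_index, ir.1)),
     st.2.2.add ir.2)

-- outer-loop body of A: a fresh seen_local per planner list ('items or []' = items)
def pvOuterA (st : PySem.Dict String Int × PySem.Dict String (Int × Int))
    (li : Int × List String) :
    PySem.Dict String Int × PySem.Dict String (Int × Int) :=
  let r := (PySem.List.enumerate li.2).foldl (pvStepA li.1) (st.1, st.2, PySem.Set.empty)
  (r.1, r.2.1)

def vote_rank_py (values_by_planner : List (List String)) : List String :=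
  let st := (PySem.List.enumerate values_by_planner).foldl pvOuterA
      (PySem.Dict.empty, PySem.Dict.empty)
  -- sorted(…, key=λk: (-counts.get(k,0), first_seen.get(k,(999,999)))): tuple key split
  -- into its two lexicographic components (the inner pair compared lexicographically via ×ₗ)
  PySem.List.sorted2 st.1.keys
    (fun key => -(st.1.getD key 0))
    (fun key => toLex (st.2.getD key ((999 : Int), (999 : Int)))) false

-- ===== PORT B =====
-- counting pass of B: state (counts, seen_local)
def pvStepB (st : PySem.Dict String Int × PySem.Set String) (raw : String) :
    PySem.Dict String Int × PySem.Set String :=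
  if st.2.contains raw then st
  else (st.1.insert raw (st.1.getD raw 0 + 1), st.2.add raw)

def pvBucketStep (b : PySem.Dict Int (List String)) (kv : String × Int) :
    PySem.Dict Int (List String) :=
  b.insert kv.2 (b.getD kv.2 [] ++ [kv.1])

def vote_rank_py_alt (values_by_planner : List (List String)) : List String :=
  let counts := values_by_planner.foldl
    (fun counts items => (items.foldl pvStepB (counts, PySem.Set.empty)).1)
    PySem.Dict.empty
  let buckets := counts.items.foldl pvBucketStep PySem.Dict.empty
  let top := PySem.List.maxD buckets.keys (fun c => c) 0
  (PySem.List.pyRange top 0 (-1)).foldl (fun acc c => acc ++ buckets.getD c []) []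

-- ===== PRECONDITION & SPEC =====
def Spec_vote_rank_py (values_by_planner : List (List String)) (out : List String) : Prop := out = vote_rank_py_alt values_by_planner
instance (values_by_planner : List (List String)) (out : List String) : Decidable (Spec_vote_rank_py values_by_planner out) := by unfold Spec_vote_rank_py; infer_instance

-- ===== CLAIM (what is proved, stated in full; the proofs are below) =====
def Claim_equal_vote_rank_py : Prop := ∀ (values_by_planner : List (List String)), Dom_vote_rank_py values_by_planner → Spec_vote_rank_py values_by_planner (vote_rank_py values_by_planner)

-- ===== LEMMAS AND PROOFS =====

-- strict lexicographic order on first-seen positions (list_index, item_index)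
def pvPlt (p q : Int × Int) : Prop := p.1 < q.1 ∨ (p.1 = q.1 ∧ p.2 < q.2)

-- loop invariant of A's counting pass: counts and first_seen share their (duplicate-free)
-- key list, first_seen values are strictly increasing along it, and all counts are ≥ 1
def pvInv (c : PySem.Dict String Int) (f : PySem.Dict String (Int × Int)) : Prop :=
  c.items.map Prod.fst = f.items.map Prod.fst ∧
  (c.items.map Prod.fst).Nodup ∧
  (f.items.map Prod.snd).Pairwise pvPlt ∧
  ∀ kv ∈ c.items, 1 ≤ kv.2

theorem pv_enum_cons (x : String) (t : List String) (i : Int) :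
    PySem.List.enumerate (x :: t) i = (i, x) :: PySem.List.enumerate t (i + 1) := rfl

theorem pv_inner_agree (items : List String) (li : Int) :
    ∀ (i : Int) (c : PySem.Dict String Int) (f : PySem.Dict String (Int × Int))
      (s : PySem.Set String),
    (((PySem.List.enumerate items i).foldl (pvStepA li) (c, f, s)).1,
     ((PySem.List.enumerate items i).foldl (pvStepA li) (c, f, s)).2.2) =
    items.foldl pvStepB (c, s) := by
  induction items with
  | nil => intro i c f s; rfl
  | cons x t ih =>
    intro i c f s
    rw [pv_enum_cons]
    simp only [List.foldl_cons]
    by_cases h : s.contains x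
    · simp only [pvStepA, pvStepB, h, if_pos]
      exact ih (i + 1) c f s
    · simp only [pvStepA, pvStepB, h]
      exact ih (i + 1) _ _ _

theorem pv_counts_agree' (vbp : List (List String)) :
    ∀ (i : Int) (c : PySem.Dict String Int) (f : PySem.Dict String (Int × Int)),
    ((PySem.List.enumerate vbp i).foldl pvOuterA (c, f)).1 =
    vbp.foldl (fun counts items => (items.foldl pvStepB (counts, PySem.Set.empty)).1) c := by
  induction vbp with
  | nil => intro i c f; rfl
  | cons items t ih =>
    intro i c f
    have h := pv_inner_agree items i 0 c f PySem.Set.empty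
    show ((PySem.List.enumerate t (i + 1)).foldl pvOuterA (pvOuterA (c, f) (i, items))).1 = _
    simp only [List.foldl_cons]
    have h1 : (pvOuterA (c, f) (i, items)).1 = (items.foldl pvStepB (c, PySem.Set.empty)).1 := by
      simp only [pvOuterA]
      exact congrArg Prod.fst h
    rw [show pvOuterA (c, f) (i, items)
        = ((pvOuterA (c, f) (i, items)).1, (pvOuterA (c, f) (i, items)).2) from rfl, h1]
    exact ih (i + 1) _ _

theorem pv_counts_agree (vbp : List (List String)) :
    ((PySem.List.enumerate vbp).foldl pvOuterA (PySem.Dict.empty, PySem.Dict.empty)).1 =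
    vbp.foldl (fun counts items => (items.foldl pvStepB (counts, PySem.Set.empty)).1)
      PySem.Dict.empty :=
  pv_counts_agree' vbp 0 PySem.Dict.empty PySem.Dict.empty

theorem pv_map_fst_overwrite {ν : Type} (l : List (String × ν)) (k : String) (v : ν) :
    (l.map (fun p => if (p.1 == k) = true then (k, v) else p)).map Prod.fst = l.map Prod.fst := by
  induction l with
  | nil => rfl
  | cons p t ih =>
    simp only [List.map_cons, ih, List.cons.injEq, and_true]
    split
    · next h => exact (eq_of_beq h).symm
    · rfl

theorem pv_mem_items_insert {ν : Type} (d : PySem.Dict String ν) (k : String) (v : ν)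
    (kv : String × ν) (h : kv ∈ (d.insert k v).items) : kv ∈ d.items ∨ kv = (k, v) := by
  rw [PySem.Dict.items_insert] at h
  split at h
  · rcases List.mem_map.mp h with ⟨p, hp, he⟩
    by_cases hb : (p.1 == k) = true
    · right; rw [if_pos hb] at he; exact he.symm
    · left; rw [if_neg hb] at he; exact he ▸ hp
  · rcases List.mem_append.mp h with h | h
    · exact Or.inl h
    · exact Or.inr (List.mem_singleton.mp h)

theorem pv_getD_nonneg (d : PySem.Dict String Int) (hv : ∀ kv ∈ d.items, 1 ≤ kv.2) (k : String) :
    0 ≤ d.getD k 0 := by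
  simp only [PySem.Dict.getD, PySem.Dict.get?]
  cases hf : d.items.find? (fun p => p.1 == k) with
  | none => simp
  | some p =>
    have := hv p (List.mem_of_find?_eq_some hf)
    simp only [Option.map_some, Option.getD_some]
    omega

theorem pv_keys_insert_new {ν : Type} (d : PySem.Dict String ν) (k : String) (v : ν)
    (h : d.contains k = false) :
    (d.insert k v).items.map Prod.fst = d.items.map Prod.fst ++ [k] := by
  rw [PySem.Dict.items_insert, if_neg (by simp [h]), List.map_append]; rfl

theorem pv_contains_eq_of_keys_eq {ν ν' : Type} (c : PySem.Dict String ν)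
    (f : PySem.Dict String ν') (hk : c.items.map Prod.fst = f.items.map Prod.fst) (k : String) :
    c.contains k = f.contains k := by
  have h1 := PySem.Dict.contains_iff_mem_keys c k
  have h2 := PySem.Dict.contains_iff_mem_keys f k
  simp only [PySem.Dict.keys] at h1 h2
  rw [hk] at h1
  by_cases h : f.contains k = true
  · rw [h, h1.mpr (h2.mp h)]
  · rw [Bool.not_eq_true] at h
    rw [h]
    rw [Bool.eq_false_iff]
    intro hc
    rw [h1] at hc
    exact (Bool.eq_false_iff.mp h) (h2.mpr hc)

theorem pv_plt_step {p : Int × Int} {li i : Int} (h : pvPlt p (li, i)) : pvPlt p (li, i + 1) := by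
  rcases h with h | ⟨h1, h2⟩
  · exact Or.inl h
  · exact Or.inr ⟨h1, by omega⟩

theorem pv_inner_inv (items : List String) (li : Int) :
    ∀ (i : Int) (c : PySem.Dict String Int) (f : PySem.Dict String (Int × Int))
      (s : PySem.Set String),
    pvInv c f → (∀ p ∈ f.items.map Prod.snd, pvPlt p (li, i)) →
    pvInv ((PySem.List.enumerate items i).foldl (pvStepA li) (c, f, s)).1
          ((PySem.List.enumerate items i).foldl (pvStepA li) (c, f, s)).2.1 ∧
    (∀ p ∈ (((PySem.List.enumerate items i).foldl (pvStepA li) (c, f, s)).2.1).items.map Prod.snd,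
        pvPlt p (li, i + items.length)) := by
  induction items with
  | nil => intro i c f s hI hB; exact ⟨hI, by simpa using hB⟩
  | cons x t ih =>
    intro i c f s hI hB
    rw [pv_enum_cons]
    simp only [List.foldl_cons, List.length_cons]
    have hlen : i + (↑t.length + 1) = (i + 1) + (↑t.length : Int) := by ring
    by_cases hs : s.contains x
    · simp only [pvStepA, hs, if_pos]
      have := ih (i + 1) c f s hI (fun p hp => pv_plt_step (hB p hp))
      rw [show (i : Int) + ↑(t.length + 1) = (i + 1) + (↑t.length : Int) by push_cast; ring]
      exact this
    · simp only [pvStepA, hs, Bool.false_eq_true, not_false_iff]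
      obtain ⟨hkeys, hnd, hpw, hval⟩ := hI
      by_cases hc : c.contains x = true
      · -- existing key: counts overwritten in place, first_seen unchanged
        have hf : f.contains x = true := by rw [← pv_contains_eq_of_keys_eq c f hkeys]; exact hc
        simp only [hf, if_pos]
        have hkeys' : (c.insert x (c.getD x 0 + 1)).items.map Prod.fst = c.items.map Prod.fst := by
          rw [PySem.Dict.items_insert, if_pos hc, pv_map_fst_overwrite]
        have hI' : pvInv (c.insert x (c.getD x 0 + 1)) f := by
          refine ⟨by rw [hkeys']; exact hkeys, by rw [hkeys']; exact hnd, hpw, ?_⟩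
          intro kv hkv
          rcases pv_mem_items_insert c x _ kv hkv with h | h
          · exact hval kv h
          · rw [h]; have := pv_getD_nonneg c hval x; simp only; omega
        have := ih (i + 1) (c.insert x (c.getD x 0 + 1)) f (s.add x) hI' (fun p hp => pv_plt_step (hB p hp))
        rw [show (i : Int) + ↑(t.length + 1) = (i + 1) + (↑t.length : Int) by push_cast; ring]
        exact this
      · -- new key: appended to both dicts
        have hf : f.contains x = false := by
          rw [← pv_contains_eq_of_keys_eq c f hkeys]; simpa using hc
        simp only [hf, Bool.false_eq_true, if_false]
        have hc' : c.contains x = false := by simpa using hc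
        have hck := pv_keys_insert_new c x (c.getD x 0 + 1) hc'
        have hfk := pv_keys_insert_new f x (li, i) hf
        have hxk : x ∉ c.items.map Prod.fst := by
          intro hm
          exact hc ((PySem.Dict.contains_iff_mem_keys c x).mpr (by simpa [PySem.Dict.keys] using hm))
        have hfsnd : (f.insert x (li, i)).items.map Prod.snd
            = f.items.map Prod.snd ++ [(li, i)] := by
          rw [PySem.Dict.items_insert, if_neg (by simp [hf]), List.map_append]; rfl
        have hI' : pvInv (c.insert x (c.getD x 0 + 1)) (f.insert x (li, i)) := by
          refine ⟨?_, ?_, ?_, ?_⟩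
          · rw [hck, hfk, hkeys]
          · rw [hck]
            exact List.Nodup.append hnd (List.nodup_singleton x)
              (fun a ha ha' => hxk ((List.mem_singleton.mp ha') ▸ ha))
          · rw [hfsnd]
            exact List.pairwise_append.mpr ⟨hpw, List.pairwise_singleton _ _,
              fun p hp q hq => (List.mem_singleton.mp hq) ▸ hB p hp⟩
          · intro kv hkv
            rcases pv_mem_items_insert c x _ kv hkv with h | h
            · exact hval kv h
            · rw [h]; have := pv_getD_nonneg c hval x; simp only; omega
        have hB' : ∀ p ∈ (f.insert x (li, i)).items.map Prod.snd, pvPlt p (li, i + 1) := by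
          intro p hp
          rw [hfsnd] at hp
          rcases List.mem_append.mp hp with h | h
          · exact pv_plt_step (hB p h)
          · rw [List.mem_singleton.mp h]; exact Or.inr ⟨rfl, by omega⟩
        have := ih (i + 1) (c.insert x (c.getD x 0 + 1)) (f.insert x (li, i)) (s.add x) hI' hB'
        rw [show (i : Int) + ↑(t.length + 1) = (i + 1) + (↑t.length : Int) by push_cast; ring]
        exact this

theorem pv_outer_inv (vbp : List (List String)) :
    ∀ (li : Int) (c : PySem.Dict String Int) (f : PySem.Dict String (Int × Int)),
    pvInv c f → (∀ p ∈ f.items.map Prod.snd, p.1 < li) →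
    pvInv ((PySem.List.enumerate vbp li).foldl pvOuterA (c, f)).1
          ((PySem.List.enumerate vbp li).foldl pvOuterA (c, f)).2 := by
  induction vbp with
  | nil => intro li c f hI _; exact hI
  | cons items t ih =>
    intro li c f hI hB
    have h0 : ∀ p ∈ f.items.map Prod.snd, pvPlt p (li, 0) := fun p hp => Or.inl (hB p hp)
    have hin := pv_inner_inv items li 0 c f PySem.Set.empty hI h0
    rw [show PySem.List.enumerate (items :: t) li
        = (li, items) :: PySem.List.enumerate t (li + 1) from rfl]
    simp only [List.foldl_cons]
    have hsplit : pvOuterA (c, f) (li, items)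
        = (((PySem.List.enumerate items 0).foldl (pvStepA li) (c, f, PySem.Set.empty)).1,
           ((PySem.List.enumerate items 0).foldl (pvStepA li) (c, f, PySem.Set.empty)).2.1) := rfl
    rw [hsplit]
    refine ih (li + 1) _ _ hin.1 ?_
    intro p hp
    rcases hin.2 p hp with h | ⟨h1, _⟩
    · omega
    · omega

theorem pv_inv_final (values_by_planner : List (List String)) :
    pvInv ((PySem.List.enumerate values_by_planner).foldl pvOuterA
              (PySem.Dict.empty, PySem.Dict.empty)).1
          ((PySem.List.enumerate values_by_planner).foldl pvOuterA
              (PySem.Dict.empty, PySem.Dict.empty)).2 := by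
  exact pv_outer_inv values_by_planner 0 PySem.Dict.empty PySem.Dict.empty
    ⟨rfl, List.nodup_nil, List.Pairwise.nil, fun kv hkv => absurd hkv (List.not_mem_nil)⟩
    (fun p hp => absurd hp (List.not_mem_nil))

theorem pv_foldl_some_ne_none {α β : Type} (f : Option β → α → Option β)
    (hf : ∀ (b : β) (x : α), ∃ c, f (some b) x = some c) :
    ∀ (t : List α) (b : β), t.foldl f (some b) ≠ none := by
  intro t
  induction t with
  | nil => intro b h; simp at h
  | cons x t ih =>
    intro b
    rw [List.foldl_cons]
    rcases hf b x with ⟨c, hc⟩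
    rw [hc]
    exact ih c

theorem pv_max?_ne_none (a : Int) (t : List Int) :
    PySem.List.max? (a :: t) (fun c => c) ≠ none := by
  simp only [PySem.List.max?, List.foldl_cons]
  exact pv_foldl_some_ne_none _
    (fun b x => by dsimp only; split <;> exact ⟨_, rfl⟩) t a

theorem pv_le_maxD (xs : List Int) : ∀ v ∈ xs, v ≤ PySem.List.maxD xs (fun c => c) 0 := by
  cases h : PySem.List.max? xs (fun c => c) with
  | some m =>
    intro v hv
    have := PySem.List.max?_isMax h v hv
    simpa [PySem.List.maxD, h] using this
  | none =>
    intro v hv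
    cases xs with
    | nil => exact absurd hv (List.not_mem_nil)
    | cons a t => exact absurd h (pv_max?_ne_none a t)

theorem pv_getD_mk_cons {ν : Type} (k : String) (v : ν) (t : List (String × ν)) (a : String)
    (d0 : ν) :
    (PySem.Dict.mk ((k, v) :: t)).getD a d0
      = if (k == a) = true then v else (PySem.Dict.mk t).getD a d0 := by
  simp only [PySem.Dict.getD, PySem.Dict.get?_mk_cons]
  split <;> rfl

theorem pv_getD_mem {ν : Type} (l : List (String × ν)) (d0 : ν)
    (hnd : (l.map Prod.fst).Nodup) :
    ∀ kv ∈ l, (PySem.Dict.mk l).getD kv.1 d0 = kv.2 := by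
  induction l with
  | nil => intro kv hkv; exact absurd hkv (List.not_mem_nil)
  | cons p t ih =>
    intro kv hkv
    rw [show p = (p.1, p.2) from rfl, pv_getD_mk_cons]
    rcases List.mem_cons.mp hkv with h | h
    · rw [h]; simp
    · have hp1 : p.1 ≠ kv.1 := by
        intro he
        have : kv.1 ∈ t.map Prod.fst := List.mem_map.mpr ⟨kv, h, rfl⟩
        rw [List.map_cons] at hnd
        exact (List.nodup_cons.mp hnd).1 (he ▸ this)
      rw [if_neg (by simpa using hp1)]
      exact ih (List.nodup_cons.mp (by rw [List.map_cons] at hnd; exact hnd)).2 kv h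

theorem pv_getD_mem_snd {ν : Type} (l : List (String × ν)) (d0 : ν)
    (hnd : (l.map Prod.fst).Nodup) (a : String) (ha : a ∈ l.map Prod.fst) :
    (PySem.Dict.mk l).getD a d0 ∈ l.map Prod.snd := by
  rcases List.mem_map.mp ha with ⟨kv, hkv, he⟩
  rw [← he, pv_getD_mem l d0 hnd kv hkv]
  exact List.mem_map.mpr ⟨kv, hkv, rfl⟩

theorem pv_pairwise_getD {ν : Type} (R : ν → ν → Prop) (d0 : ν) :
    ∀ (l : List (String × ν)), (l.map Prod.fst).Nodup → (l.map Prod.snd).Pairwise R →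
    (l.map Prod.fst).Pairwise
      (fun a b => R ((PySem.Dict.mk l).getD a d0) ((PySem.Dict.mk l).getD b d0)) := by
  intro l
  induction l with
  | nil => intro _ _; exact List.Pairwise.nil
  | cons p t ih =>
    intro hnd hpw
    rw [List.map_cons] at hnd hpw ⊢
    obtain ⟨hp1, hndt⟩ := List.nodup_cons.mp hnd
    obtain ⟨hv, hpwt⟩ := List.pairwise_cons.mp hpw
    have hstep : ∀ a, a ∈ t.map Prod.fst →
        (PySem.Dict.mk (p :: t)).getD a d0 = (PySem.Dict.mk t).getD a d0 := by
      intro a ha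
      rw [show p = (p.1, p.2) from rfl, pv_getD_mk_cons, if_neg]
      simp only [beq_iff_eq]
      intro he; exact hp1 (he ▸ ha)
    refine List.pairwise_cons.mpr ⟨?_, ?_⟩
    · intro b hb
      rw [show p = (p.1, p.2) from rfl, pv_getD_mk_cons, if_pos (by simp), hstep b hb]
      exact hv _ (pv_getD_mem_snd t d0 hndt b hb)
    · refine List.Pairwise.imp_of_mem ?_ (ih hndt hpwt)
      intro a b ha hb hR
      rw [hstep a ha, hstep b hb]
      exact hR

theorem pv_bucket_getD : ∀ (l : List (String × Int)) (b0 : PySem.Dict Int (List String)) (v : Int),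
    (l.foldl pvBucketStep b0).getD v []
      = b0.getD v [] ++ (l.filter (fun kv => kv.2 == v)).map Prod.fst := by
  intro l
  induction l with
  | nil => intro b0 v; simp
  | cons kv t ih =>
    intro b0 v
    simp only [List.foldl_cons, List.filter_cons]
    rw [ih]
    by_cases h : kv.2 = v
    · rw [if_pos (by simpa using h), List.map_cons]
      simp only [pvBucketStep]
      rw [PySem.Dict.getD_insert, if_pos h.symm, h, List.append_assoc]
      rfl
    · rw [if_neg (by simpa using h)]
      simp only [pvBucketStep]
      rw [PySem.Dict.getD_insert, if_neg (fun he => h he.symm)]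

theorem pv_mem_keys_insert {κ ν : Type} [BEq κ] [LawfulBEq κ] (d : PySem.Dict κ ν)
    (k k' : κ) (v : ν) : k' ∈ (d.insert k v).keys ↔ k' = k ∨ k' ∈ d.keys := by
  rw [← PySem.Dict.contains_iff_mem_keys, PySem.Dict.contains_insert]
  simp [PySem.Dict.contains_iff_mem_keys]

theorem pv_bucket_keys_mem : ∀ (l : List (String × Int)) (b0 : PySem.Dict Int (List String))
    (v : Int), v ∈ (l.foldl pvBucketStep b0).keys ↔ v ∈ b0.keys ∨ v ∈ l.map Prod.snd := by
  intro l
  induction l with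
  | nil => intro b0 v; simp
  | cons kv t ih =>
    intro b0 v
    simp only [List.foldl_cons, List.map_cons, List.mem_cons]
    rw [ih]
    simp only [pvBucketStep]
    rw [pv_mem_keys_insert]
    tauto

theorem pv_sorted2_eq (xs : List String) (k1 : String → Int) (k2 : String → Lex (Int × Int)) :
    PySem.List.sorted2 xs k1 k2 false
      = PySem.List.sorted xs (fun x => toLex (k1 x, k2 x)) false := by
  have hbe : ∀ a b : String,
      (decide (k1 a < k1 b) || (!decide (k1 b < k1 a) && decide (k2 a < k2 b)))
        = decide (toLex (k1 a, k2 a) < toLex (k1 b, k2 b)) := by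
    intro a b
    have hiff : (toLex (k1 a, k2 a) < toLex (k1 b, k2 b)) ↔
        (k1 a < k1 b ∨ (k1 a = k1 b ∧ k2 a < k2 b)) := Prod.Lex.lt_iff
    by_cases h1 : k1 a < k1 b <;> by_cases h2 : k1 b < k1 a <;> by_cases h3 : k2 a < k2 b <;>
      simp [h1, h2, h3, hiff] <;> omega
  rw [PySem.List.sorted_eq_foldl_insertBy]
  show List.foldl (fun acc x => PySem.List.insertBy
      (fun a b => decide (k1 a < k1 b) || (!decide (k1 b < k1 a) && decide (k2 a < k2 b)))
      x acc) [] xs = _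
  simp only [hbe]

theorem pv_main (C : PySem.Dict String Int) (F : PySem.Dict String (Int × Int))
    (hI : pvInv C F) :
    PySem.List.sorted2 C.keys (fun k => -(C.getD k 0))
        (fun k => toLex (F.getD k ((999 : Int), (999 : Int)))) false
      = (PySem.List.pyRange
            (PySem.List.maxD (C.items.foldl pvBucketStep PySem.Dict.empty).keys (fun c => c) 0)
            0 (-1)).foldl
          (fun acc c => acc ++ (C.items.foldl pvBucketStep PySem.Dict.empty).getD c []) [] := by
  obtain ⟨hkeys, hnd, hpw, hval⟩ := hI
  rw [pv_sorted2_eq]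
  set buckets := C.items.foldl pvBucketStep PySem.Dict.empty with hbk
  set top := PySem.List.maxD buckets.keys (fun c => c) 0 with htopdef
  set key : String → Lex (Int × Lex (Int × Int)) :=
    fun k => toLex (-(C.getD k 0), toLex (F.getD k ((999 : Int), (999 : Int)))) with hkey
  set chunk : Int → List String :=
    fun c => (C.items.filter (fun kv => kv.2 == c)).map Prod.fst with hchunk
  have hkC : C.keys = C.items.map Prod.fst := rfl
  have hbg : ∀ v, buckets.getD v [] = chunk v := by
    intro v
    rw [hbk, pv_bucket_getD, PySem.Dict.getD_empty, List.nil_append]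
  have hbkeys : ∀ v, v ∈ buckets.keys ↔ v ∈ C.items.map Prod.snd := by
    intro v
    rw [hbk, pv_bucket_keys_mem]
    have : v ∉ (PySem.Dict.empty : PySem.Dict Int (List String)).keys := by
      intro h; exact absurd h (List.not_mem_nil)
    tauto
  have hC : ∀ kv ∈ C.items, C.getD kv.1 0 = kv.2 := pv_getD_mem C.items 0 hnd
  have hchmem : ∀ (c : Int) (x : String), x ∈ chunk c → x ∈ C.items.map Prod.fst ∧ C.getD x 0 = c := by
    intro c x hx
    rw [hchunk] at hx
    rcases List.mem_map.mp hx with ⟨kv, hkv, he⟩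
    rcases List.mem_filter.mp hkv with ⟨hm, hv⟩
    have hv' : kv.2 = c := by simpa using hv
    exact ⟨List.mem_map.mpr ⟨kv, hm, he⟩, by rw [← he, hC kv hm, hv']⟩
  have hle : ∀ kv ∈ C.items, 1 ≤ kv.2 ∧ kv.2 ≤ top := by
    intro kv hkv
    refine ⟨hval kv hkv, ?_⟩
    exact pv_le_maxD buckets.keys kv.2 ((hbkeys kv.2).mpr (List.mem_map.mpr ⟨kv, hkv, rfl⟩))
  have hrng : ∀ x : Int, x ∈ PySem.List.pyRange top 0 (-1) ↔ 0 < x ∧ x ≤ top := by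
    intro x
    rw [PySem.List.mem_pyRange_iff_of_neg (by norm_num)]
    constructor
    · rintro ⟨h1, h2, _⟩; exact ⟨h1, h2⟩
    · rintro ⟨h1, h2⟩; exact ⟨h1, h2, ⟨-(x - top), by ring⟩⟩
  have hrngpw : (PySem.List.pyRange top 0 (-1)).Pairwise (fun a b => b < a) := by
    rw [PySem.List.pyRange_neg_one, List.pairwise_map]
    exact List.Pairwise.imp (fun {a b} (h : a < b) => by omega) List.pairwise_lt_range
  -- strict key order along the insertion order of the keys
  have hfs : (C.items.map Prod.fst).Pairwise
      (fun a b => pvPlt (F.getD a ((999 : Int), (999 : Int))) (F.getD b ((999 : Int), (999 : Int)))) := by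
    have hndF : (F.items.map Prod.fst).Nodup := hkeys ▸ hnd
    have := pv_pairwise_getD pvPlt ((999 : Int), (999 : Int)) F.items hndF hpw
    rw [← hkeys] at this
    exact this
  have hkeylt : ∀ a b : String, C.getD a 0 = C.getD b 0 →
      pvPlt (F.getD a ((999 : Int), (999 : Int))) (F.getD b ((999 : Int), (999 : Int))) →
      key a < key b := by
    intro a b hcnt hplt
    rw [hkey]
    rw [Prod.Lex.lt_iff]
    right
    refine ⟨by simpa using congrArg Neg.neg hcnt, ?_⟩
    show toLex _ < toLex _
    rw [Prod.Lex.lt_iff]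
    exact hplt
  have hkeylt2 : ∀ a b : String, C.getD b 0 < C.getD a 0 → key a < key b := by
    intro a b h
    rw [hkey, Prod.Lex.lt_iff]
    left
    simpa using Int.neg_lt_neg h
  -- B's output as a flatten of buckets
  rw [PySem.List.foldl_append_eq_flatMap, List.nil_append, List.flatMap_def,
    List.map_congr_left (fun c _ => hbg c)]
  have hchnd : ∀ c : Int, (chunk c).Nodup := by
    intro c
    rw [hchunk]
    exact List.Nodup.sublist (List.Sublist.map _ List.filter_sublist) hnd
  apply PySem.List.sorted_eq_of_perm_of_pairwise_lt
  · -- permutation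
    rw [List.perm_ext_iff_of_nodup ?_ (hkC ▸ hnd)]
    · intro a
      rw [List.mem_flatten]
      constructor
      · rintro ⟨L, hL, haL⟩
        rcases List.mem_map.mp hL with ⟨c, _, hLc⟩
        rw [hkC]
        exact (hchmem c a (hLc ▸ haL)).1
      · intro ha
        rw [hkC] at ha
        rcases List.mem_map.mp ha with ⟨kv, hkv, he⟩
        refine ⟨chunk kv.2, List.mem_map.mpr ⟨kv.2, ?_, rfl⟩, ?_⟩
        · rw [hrng]
          have := hle kv hkv
          omega
        · rw [hchunk]
          exact List.mem_map.mpr ⟨kv, List.mem_filter.mpr ⟨hkv, by simp⟩, he⟩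
    · -- nodup of the flatten
      rw [List.nodup_flatten]
      constructor
      · intro L hL
        rcases List.mem_map.mp hL with ⟨c, _, hLc⟩
        exact hLc ▸ hchnd c
      · rw [List.pairwise_map]
        refine List.Pairwise.imp_of_mem ?_ hrngpw
        intro c c' _ _ hlt x hx hx'
        have h1 := (hchmem c x hx).2
        have h2 := (hchmem c' x hx').2
        omega
  · -- pairwise strictly increasing composite key
    rw [List.pairwise_flatten]
    constructor
    · intro L hL
      rcases List.mem_map.mp hL with ⟨c, _, hLc⟩
      rw [← hLc, hchunk, List.pairwise_map]
      have hbase := hfs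
      rw [List.pairwise_map] at hbase
      refine List.Pairwise.imp_of_mem ?_ (List.Pairwise.filter _ hbase)
      intro p q hp hq hplt
      have hpc : p.2 = c := by simpa using (List.mem_filter.mp hp).2
      have hqc : q.2 = c := by simpa using (List.mem_filter.mp hq).2
      refine hkeylt p.1 q.1 ?_ hplt
      rw [hC p (List.mem_filter.mp hp).1, hC q (List.mem_filter.mp hq).1, hpc, hqc]
    · rw [List.pairwise_map]
      refine List.Pairwise.imp_of_mem ?_ hrngpw
      intro c c' _ _ hlt x hx y hy
      have h1 := (hchmem c x hx).2
      have h2 := (hchmem c' y hy).2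
      exact hkeylt2 x y (by omega)

-- ===== VERDICT (by name: the statement is the Claim_ definition above) =====
theorem vote_rank_py_spec : Claim_equal_vote_rank_py := by
  intro vbp _
  unfold Spec_vote_rank_py
  show vote_rank_py vbp = vote_rank_py_alt vbp
  simp only [vote_rank_py, vote_rank_py_alt]
  rw [← pv_counts_agree vbp]
  exact pv_main _ _ (pv_inv_final vbp)
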